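-- pv_equiv track=rewrite | github.com/helenakristela/Tucil1_13524109 | src/bruteforce.py | validasi_input
-- ===== SOURCE A (Python) =====
-- def validasi_input(board):
--     n = len(board)
--     if n == 0:
--         return False
--     for row in board:
--         if len(row) != n:
--             return False
--     for b in range(n):
--         for k in range(n):
--             now = board[b][k]
--             if len(now) != 1 or not('A' <= now <= 'Z'):
--                 return False
--     if n > 26:
--         return False
--     daerah = set_daerah(board)
--     if len(daerah) != n:
--         return False
--     return True
--
-- def set_daerah(board):
--     n = len(board)
--     s = set()
--     for b in range(n):
--         for k in range(n):
--             s.add(board[b][k])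
--     return s
-- ===== SOURCE B (Python) =====
-- UPPERCASE = frozenset("ABCDEFGHIJKLMNOPQRSTUVWXYZ")
--
-- def validasi_input(board):
--     n = len(board)
--     if not (0 < n <= 26):
--         return False
--     if any(len(row) != n for row in board):
--         return False
--     cells = sorted(c for row in board for c in row)
--     if any(c not in UPPERCASE for c in cells):
--         return False
--     changes = sum(1 for a, b in zip(cells, cells[1:]) if a != b)
--     return changes + 1 == n
-- ===== Notes on version B (the rewrite author's own statement) =====
-- stated objective: alternative
-- what changed: A validates cells by lexicographic range comparisons in an index-based double loop and counts distinct labels by building a set in the helper set_daerah; B instead tests each cell by membership in a fixed frozenset of the 26 uppercase letters and counts distinct labels with a sort-then-scan: it sorts the flattened cells and counts adjacent changes, returning changes + 1 == n, so no set of labels is ever built.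
import Mathlib
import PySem

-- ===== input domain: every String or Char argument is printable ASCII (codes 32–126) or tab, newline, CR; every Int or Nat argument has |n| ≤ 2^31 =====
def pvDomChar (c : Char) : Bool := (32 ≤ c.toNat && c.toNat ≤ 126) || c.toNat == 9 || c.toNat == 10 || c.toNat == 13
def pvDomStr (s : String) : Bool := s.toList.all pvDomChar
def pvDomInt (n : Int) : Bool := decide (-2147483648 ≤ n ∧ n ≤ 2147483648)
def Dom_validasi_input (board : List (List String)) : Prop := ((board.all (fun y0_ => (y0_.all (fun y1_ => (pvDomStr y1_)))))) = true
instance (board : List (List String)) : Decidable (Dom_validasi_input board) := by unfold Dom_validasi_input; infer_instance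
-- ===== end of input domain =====

-- B replaces A's lexicographic range tests and set_daerah set-building by membership in a fixed
-- 26-letter set plus a sort-then-scan distinct count (adjacent changes of the sorted cells);
-- objective: alternative. Equivalence is proved for all inputs.

-- ===== PORT A =====
-- exact port of Python's lexicographic string ≤ (code-point order), applied to .toList
def pyStrLe : List Char → List Char → Bool
  | [], _ => true
  | _ :: _, [] => false
  | a :: as, b :: bs => if a < b then true else if b < a then false else pyStrLe as bs

-- port of set_daerah; board[b][k] via getD: every reachable call has b,k in range
def set_daerah (board : List (List String)) : PySem.Set String :=
  let n := board.length
  (List.range n).foldl (fun s b =>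
    (List.range n).foldl (fun s k => PySem.Set.add s ((board.getD b []).getD k "")) s)
    PySem.Set.empty

def validasi_input (board : List (List String)) : Bool :=
  let n := board.length
  if n == 0 then false
  else if !(board.all (fun row => row.length == n)) then false
  else if !((List.range n).all (fun b => (List.range n).all (fun k =>
      let now := (board.getD b []).getD k ""
      (PySem.Str.len now == 1) && pyStrLe "A".toList now.toList && pyStrLe now.toList "Z".toList)))
    then false
  else if n > 26 then false
  else
    let daerah := set_daerah board
    if !(daerah.length == n) then false
    else true

-- ===== PORT B =====
-- the module-level frozenset of the 26 uppercase letters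
def UPPERCASE : PySem.Set String :=
  PySem.Set.ofList ["A","B","C","D","E","F","G","H","I","J","K","L","M",
                    "N","O","P","Q","R","S","T","U","V","W","X","Y","Z"]

def validasi_input_alt (board : List (List String)) : Bool :=
  let n := board.length
  if !(decide (0 < n) && decide (n ≤ 26)) then false
  else if board.any (fun row => row.length != n) then false
  else
    let cells := PySem.List.sorted (board.flatMap (fun row => row)) (fun c => c) false
    if cells.any (fun c => !(PySem.Set.contains UPPERCASE c)) then false
    else
      let changes := (cells.zip (cells.drop 1)).countP (fun p => p.1 != p.2)
      changes + 1 == n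

-- ===== PRECONDITION & SPEC =====
def Spec_validasi_input (board : List (List String)) (out : Bool) : Prop := out = validasi_input_alt board
instance (board : List (List String)) (out : Bool) : Decidable (Spec_validasi_input board out) := by unfold Spec_validasi_input; infer_instance

-- ===== CLAIM (what is proved, stated in full; the proofs are below) =====
def Claim_equal_validasi_input : Prop := ∀ (board : List (List String)), Dom_validasi_input board → Spec_validasi_input board (validasi_input board)

-- ===== LEMMAS AND PROOFS =====

def cellP (c : String) : Bool :=
  (PySem.Str.len c == 1) && pyStrLe "A".toList c.toList && pyStrLe c.toList "Z".toList

lemma all_range_getD {α : Type} (xs : List α) (d : α) (p : α → Bool) :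
    (List.range xs.length).all (fun i => p (xs.getD i d)) = xs.all p := by
  induction xs with
  | nil => simp
  | cons x t ih =>
    simp only [List.length_cons, List.range_succ_eq_map, List.all_cons, List.all_map,
      Function.comp_def, Nat.succ_eq_add_one, List.getD_cons_zero, List.getD_cons_succ,
      ih]

lemma foldl_range_getD {α β : Type} (xs : List α) (d : α) (f : β → α → β) :
    ∀ s : β, (List.range xs.length).foldl (fun s i => f s (xs.getD i d)) s = xs.foldl f s := by
  induction xs with
  | nil => intro s; simp
  | cons x t ih =>
    intro s
    simp only [List.length_cons, List.range_succ_eq_map, List.foldl_cons, List.foldl_map,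
      List.getD_cons_zero, List.getD_cons_succ]
    exact ih (f s x)

lemma all_congr_mem {α : Type} {l : List α} {p q : α → Bool} (h : ∀ a ∈ l, p a = q a) :
    l.all p = l.all q := by
  induction l with
  | nil => rfl
  | cons x t ih => simp_all

lemma foldl_congr_mem' {α β : Type} {l : List α} {f g : β → α → β}
    (h : ∀ (s : β) (a : α), a ∈ l → f s a = g s a) :
    ∀ s : β, l.foldl f s = l.foldl g s := by
  induction l with
  | nil => intro s; rfl
  | cons x t ih =>
    intro s
    simp only [List.foldl_cons, h s x (by simp)]
    exact ih (fun s a ha => h s a (by simp [ha])) _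

-- single-character string comparison facts
lemma le_charA (ch : Char) : 'A' ≤ ch ↔ 65 ≤ ch.toNat := by
  rw [Char.le_def, UInt32.le_iff_toNat_le]; exact Iff.rfl

lemma le_charZ (ch : Char) : ch ≤ 'Z' ↔ ch.toNat ≤ 90 := by
  rw [Char.le_def, UInt32.le_iff_toNat_le]; exact Iff.rfl

lemma pyStrLe_single (a b : Char) : pyStrLe [a] [b] = true ↔ a ≤ b := by
  simp only [pyStrLe]
  split_ifs with h1 h2
  · simp [le_of_lt h1]
  · simp [not_le.mpr h2]
  · simp [not_lt.mp h2]

lemma mem_letters_iff (c : String) :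
    c ∈ (["A","B","C","D","E","F","G","H","I","J","K","L","M",
          "N","O","P","Q","R","S","T","U","V","W","X","Y","Z"] : List String)
    ↔ ∃ ch, c.toList = [ch] ∧ 65 ≤ ch.toNat ∧ ch.toNat ≤ 90 := by
  constructor
  · intro hmem
    fin_cases hmem <;> exact ⟨_, rfl, by decide, by decide⟩
  · rintro ⟨ch, hc, h1, h2⟩
    have hm : ch ∈ (['A','B','C','D','E','F','G','H','I','J','K','L','M',
        'N','O','P','Q','R','S','T','U','V','W','X','Y','Z'] : List Char) := by
      have h2' := Char.ofNat_toNat ch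
      interval_cases h : ch.toNat <;> rw [← h2'] <;> decide
    have hmap : [ch] ∈ ((["A","B","C","D","E","F","G","H","I","J","K","L","M",
        "N","O","P","Q","R","S","T","U","V","W","X","Y","Z"] : List String).map String.toList) := by
      fin_cases hm <;> decide
    obtain ⟨s, hs, hseq⟩ := List.mem_map.mp hmap
    rw [String.toList_inj.mp (hc.trans hseq.symm)]
    exact hs

lemma cellP_eq (c : String) : cellP c = PySem.Set.contains UPPERCASE c := by
  rw [Bool.eq_iff_iff]
  rw [show (PySem.Set.contains UPPERCASE c = true) ↔
      c ∈ (["A","B","C","D","E","F","G","H","I","J","K","L","M",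
            "N","O","P","Q","R","S","T","U","V","W","X","Y","Z"] : List String) from
    (PySem.Set.contains_iff _ _).trans (PySem.Set.mem_ofList _ _)]
  rw [mem_letters_iff]
  unfold cellP
  have hA : ("A" : String).toList = ['A'] := by decide
  have hZ : ("Z" : String).toList = ['Z'] := by decide
  constructor
  · intro hL
    rw [Bool.and_eq_true, Bool.and_eq_true] at hL
    obtain ⟨⟨hlen, hle1⟩, hle2⟩ := hL
    have hlen' : c.toList.length = 1 := by
      rw [PySem.Str.len_eq] at hlen
      have : (c.toList.length : Int) = 1 := by simpa using hlen
      exact_mod_cast this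
    obtain ⟨ch, hc⟩ := List.length_eq_one_iff.mp hlen'
    rw [hA, hc] at hle1
    rw [hZ, hc] at hle2
    exact ⟨ch, hc, (le_charA ch).mp ((pyStrLe_single _ _).mp hle1),
      (le_charZ ch).mp ((pyStrLe_single _ _).mp hle2)⟩
  · rintro ⟨ch, hc, h1, h2⟩
    rw [Bool.and_eq_true, Bool.and_eq_true]
    refine ⟨⟨?_, ?_⟩, ?_⟩
    · rw [PySem.Str.len_eq, hc]; rfl
    · rw [hA, hc]; exact (pyStrLe_single _ _).mpr ((le_charA ch).mpr h1)
    · rw [hZ, hc]; exact (pyStrLe_single _ _).mpr ((le_charZ ch).mpr h2)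

-- sorted adjacent-change count = number of distinct elements
lemma changes_card : ∀ (s : List String), s.Pairwise (· ≤ ·) → s ≠ [] →
    (s.zip (s.drop 1)).countP (fun p => p.1 != p.2) + 1 = s.toFinset.card := by
  intro s
  induction s with
  | nil => intro _ h; exact absurd rfl h
  | cons x rest ih =>
    intro hp _
    cases rest with
    | nil => simp
    | cons y t =>
      obtain ⟨hxall, hp'⟩ := List.pairwise_cons.mp hp
      have hrec := ih hp' (by simp)
      have hzip : ((x :: y :: t).zip ((x :: y :: t).drop 1))
          = (x, y) :: ((y :: t).zip ((y :: t).drop 1)) := by simp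
      rw [hzip, List.countP_cons]
      by_cases hxy : x = y
      · subst hxy
        have hins : (x :: x :: t).toFinset = (x :: t).toFinset := by
          simp [List.toFinset_cons]
        rw [hins, ← hrec]
        simp
      · have hxt : x ∉ (y :: t) := by
          intro hx
          rcases List.mem_cons.mp hx with h | h
          · exact hxy h
          · exact hxy (le_antisymm (hxall y (by simp)) ((List.pairwise_cons.mp hp').1 x h))
        have hcard : (x :: y :: t).toFinset.card = (y :: t).toFinset.card + 1 := by
          rw [List.toFinset_cons, Finset.card_insert_of_notMem (by simpa using hxt)]
        rw [hcard, ← hrec]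
        simp [hxy]

-- flatten the nested Set.add fold of set_daerah
lemma ofList_length_card (F : List String) :
    (PySem.Set.ofList F).length = F.toFinset.card := by
  rw [← List.toFinset_card_of_nodup (PySem.Set.nodup_ofList F)]
  congr 1
  ext x
  simp [PySem.Set.mem_ofList]

lemma validasi_eq (board : List (List String)) :
    validasi_input board = validasi_input_alt board := by
  by_cases hn : board.length = 0
  · simp [validasi_input, validasi_input_alt, hn]
  · by_cases hlen : ∀ row ∈ board, row.length = board.length
    · have hlenb : board.all (fun row => row.length == board.length) = true := by
        simp only [List.all_eq_true]
        intro r hr; simpa using hlen r hr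
      have hanyb : board.any (fun row => row.length != board.length) = false := by
        rw [List.any_eq_false]
        intro r hr; simp [hlen r hr]
      -- A's index-based cell sweep = structural sweep
      have hcells :
          (List.range board.length).all (fun b => (List.range board.length).all (fun k =>
            let now := (board.getD b []).getD k ""
            (PySem.Str.len now == 1) && pyStrLe "A".toList now.toList &&
              pyStrLe now.toList "Z".toList))
          = board.all (fun row => row.all cellP) := by
        have step : ∀ b ∈ List.range board.length,
            (List.range board.length).all (fun k =>
              let now := (board.getD b []).getD k ""
              (PySem.Str.len now == 1) && pyStrLe "A".toList now.toList &&
                pyStrLe now.toList "Z".toList)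
            = (board.getD b []).all cellP := by
          intro b hb
          have hb' : b < board.length := List.mem_range.mp hb
          have hmem : board.getD b [] ∈ board := by
            rw [List.getD_eq_getElem board [] hb']
            exact List.getElem_mem hb'
          have hL : (board.getD b []).length = board.length := hlen _ hmem
          calc (List.range board.length).all (fun k =>
                let now := (board.getD b []).getD k ""
                (PySem.Str.len now == 1) && pyStrLe "A".toList now.toList &&
                  pyStrLe now.toList "Z".toList)
              = (List.range (board.getD b []).length).all (fun k =>
                  cellP ((board.getD b []).getD k "")) := by rw [hL]; rfl
            _ = (board.getD b []).all cellP := all_range_getD _ _ _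
        calc (List.range board.length).all (fun b => (List.range board.length).all (fun k =>
              let now := (board.getD b []).getD k ""
              (PySem.Str.len now == 1) && pyStrLe "A".toList now.toList &&
                pyStrLe now.toList "Z".toList))
            = (List.range board.length).all (fun b => (board.getD b []).all cellP) :=
              all_congr_mem step
          _ = board.all (fun row => row.all cellP) := all_range_getD board [] (fun row => row.all cellP)
      -- A's set_daerah = set of the flattened cells
      have hset2 : set_daerah board = PySem.Set.ofList board.flatten := by
        unfold set_daerah
        have step : ∀ (s : PySem.Set String) (b : Nat), b ∈ List.range board.length →
            (List.range board.length).foldl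
              (fun s k => PySem.Set.add s ((board.getD b []).getD k "")) s
            = (board.getD b []).foldl (fun s c => PySem.Set.add s c) s := by
          intro s b hb
          have hb' : b < board.length := List.mem_range.mp hb
          have hmem : board.getD b [] ∈ board := by
            rw [List.getD_eq_getElem board [] hb']
            exact List.getElem_mem hb'
          have hL : (board.getD b []).length = board.length := hlen _ hmem
          calc (List.range board.length).foldl
                (fun s k => PySem.Set.add s ((board.getD b []).getD k "")) s
              = (List.range (board.getD b []).length).foldl
                  (fun s k => PySem.Set.add s ((board.getD b []).getD k "")) s := by rw [hL]
            _ = (board.getD b []).foldl (fun s c => PySem.Set.add s c) s :=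
                foldl_range_getD _ _ _ s
        calc (List.range board.length).foldl (fun s b =>
              (List.range board.length).foldl
                (fun s k => PySem.Set.add s ((board.getD b []).getD k "")) s)
              PySem.Set.empty
            = (List.range board.length).foldl
                (fun s b => (board.getD b []).foldl (fun s c => PySem.Set.add s c) s)
                PySem.Set.empty := foldl_congr_mem' step _
          _ = board.foldl (fun s row => row.foldl (fun s c => PySem.Set.add s c) s)
                PySem.Set.empty := foldl_range_getD board [] _ _
          _ = board.flatten.foldl (fun s c => PySem.Set.add s c) PySem.Set.empty :=
                (List.foldl_flatten).symm
          _ = PySem.Set.ofList board.flatten := rfl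
      -- B's cell membership test over the sorted cells = A's structural cell sweep
      have hflat : board.flatMap (fun row => row) = board.flatten := by simp
      have hallB : (PySem.List.sorted (board.flatMap (fun row => row)) (fun c => c) false).all
          (fun c => PySem.Set.contains UPPERCASE c) = board.all (fun row => row.all cellP) := by
        rw [List.Perm.all_eq (PySem.List.sorted_perm _ _ _), hflat,
          all_congr_mem (fun a _ => (cellP_eq a).symm)]
        simp
      have hanyB : (PySem.List.sorted (board.flatMap (fun row => row)) (fun c => c) false).any
          (fun c => !(PySem.Set.contains UPPERCASE c))
          = !(board.all (fun row => row.all cellP)) := by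
        rw [← List.not_all_eq_any_not, hallB]
      have hpos : 0 < board.length := Nat.pos_of_ne_zero hn
      by_cases hc : board.all (fun row => row.all cellP) = true
      · by_cases h26 : board.length ≤ 26
        · -- everything passes: both sides compare a distinct-label count with n
          have hF : board.flatten ≠ [] := by
            cases board with
            | nil => exact absurd rfl hn
            | cons r rest =>
              intro hfl
              have hr0 : r = [] := (List.flatten_eq_nil_iff.mp hfl) r (by simp)
              have hrl := hlen r (by simp)
              rw [hr0] at hrl
              simp at hrl
          set cells := PySem.List.sorted (board.flatMap (fun row => row)) (fun c => c) false
            with hcdef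
          have hperm : cells.Perm board.flatten := by
            rw [hcdef, hflat]; exact PySem.List.sorted_perm _ _ _
          have hpair : cells.Pairwise (· ≤ ·) := by
            have := PySem.List.sorted_pairwise
              (xs := board.flatMap (fun row => row)) (key := fun c => c)
            simpa [hcdef] using this
          have hcne : cells ≠ [] := by
            intro h
            exact hF (List.nil_perm.mp (h ▸ hperm))
          have hcnt := changes_card cells hpair hcne
          have hsetlen : (set_daerah board).length
              = (cells.zip (cells.drop 1)).countP (fun p => p.1 != p.2) + 1 := by
            rw [hset2, ofList_length_card,
              ← List.toFinset_eq_of_perm cells board.flatten hperm, ← hcnt]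
          simp only [validasi_input, validasi_input_alt, ← hcdef, hlenb, hcells, hc, hanyb,
            hanyB, hsetlen]
          simp [hn, hpos, h26, Nat.not_lt.mpr h26, ← Bool.beq_eq_decide_eq]
        · -- n > 26: both false
          have hA : validasi_input board = false := by
            simp only [validasi_input, hlenb, hcells, hc]
            simp [hn, Nat.lt_of_not_le h26]
          have hB : validasi_input_alt board = false := by
            simp only [validasi_input_alt]
            simp [h26]
          rw [hA, hB]
      · -- a bad cell: both false
        have hc' : board.all (fun row => row.all cellP) = false := eq_false_of_ne_true hc
        have hA : validasi_input board = false := by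
          simp only [validasi_input, hlenb, hcells, hc']
          simp [hn]
        have hB : validasi_input_alt board = false := by
          simp only [validasi_input_alt, hanyb, hanyB, hc']
          simp
        rw [hA, hB]
    · -- a row of the wrong length: both false
      simp only [not_forall, exists_prop] at hlen
      obtain ⟨r, hr, hrl⟩ := hlen
      have hlenb : board.all (fun row => row.length == board.length) = false := by
        rw [Bool.eq_false_iff]
        intro h
        rw [List.all_eq_true] at h
        exact hrl (by simpa using h r hr)
      have hanyb : board.any (fun row => row.length != board.length) = true := by
        rw [List.any_eq_true]
        exact ⟨r, hr, by simpa using hrl⟩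
      have hA : validasi_input board = false := by
        simp only [validasi_input, hlenb]
        simp [hn]
      have hB : validasi_input_alt board = false := by
        simp only [validasi_input_alt, hanyb]
        simp
      rw [hA, hB]

-- ===== VERDICT (by name: the statement is the Claim_ definition above) =====
theorem validasi_input_spec : Claim_equal_validasi_input := by
  intro board _
  unfold Spec_validasi_input
  exact validasi_eq board
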